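-- pv_equiv track=rewrite | github.com/Xjajwjjsjs/PyroX | userbot.py | _encode_fingerprint
-- ===== SOURCE A (Python) =====
-- _ZW_0 = "\u200B"   # 零宽空格     → bit 0
--
-- _ZW_1 = "\u200C"   # 零宽非连接符 → bit 1
--
-- _ZW_SEP = "\u200D" # 零宽连接符   → 字节分隔符
--
-- def _encode_fingerprint(uid: int) -> str:
--     """将 user_id 编码为零宽字符串"""
--     uid_bytes = str(uid).encode("utf-8")
--     bits = []
--     for byte in uid_bytes:
--         for i in range(7, -1, -1):
--             bits.append(_ZW_1 if (byte >> i) & 1 else _ZW_0)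
--         bits.append(_ZW_SEP)
--     return "".join(bits)
-- ===== SOURCE B (Python) =====
-- _ZW_0 = "\u200B"   # zero-width space        -> bit 0
-- _ZW_1 = "\u200C"   # zero-width non-joiner   -> bit 1
-- _ZW_SEP = "\u200D" # zero-width joiner       -> byte separator
--
-- # Precomputed: for every byte value, the full 8-char MSB-first encoded block plus separator.
-- _BYTE_TABLE = [
--     format(b, "08b").replace("0", _ZW_0).replace("1", _ZW_1) + _ZW_SEP
--     for b in range(256)
-- ]
--
-- def _encode_fingerprint(uid: int) -> str:
--     """将 user_id 编码为零宽字符串"""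
--     return "".join(_BYTE_TABLE[b] for b in str(uid).encode("utf-8"))
-- ===== Notes on version B (the rewrite author's own statement) =====
-- stated objective: idiomatic
-- what changed: The bit-by-bit shift loop is gone: a module-level table precomputed for every possible byte value maps each byte to its complete encoded block (built once via format(b,'08b') plus string replacement), and the function is a single join over table lookups.
import Mathlib
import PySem

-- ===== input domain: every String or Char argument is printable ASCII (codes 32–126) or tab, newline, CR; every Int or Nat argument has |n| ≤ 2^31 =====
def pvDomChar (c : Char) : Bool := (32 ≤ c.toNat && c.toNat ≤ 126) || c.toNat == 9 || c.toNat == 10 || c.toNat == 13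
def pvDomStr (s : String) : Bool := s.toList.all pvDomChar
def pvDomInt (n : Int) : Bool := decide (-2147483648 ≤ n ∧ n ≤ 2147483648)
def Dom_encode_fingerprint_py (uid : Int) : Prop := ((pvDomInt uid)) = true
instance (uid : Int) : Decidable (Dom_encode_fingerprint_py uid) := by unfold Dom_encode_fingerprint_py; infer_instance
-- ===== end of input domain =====

-- B replaces A's per-bit shift loop by a block table precomputed for every byte value; same return value, no speed claim.

-- ===== PORT A =====
def pvZW0 : Char := Char.ofNat 0x200B
def pvZW1 : Char := Char.ofNat 0x200C
def pvZWSEP : Char := Char.ofNat 0x200D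

def encode_fingerprint_py (uid : Int) : String :=
  -- str(uid).encode("utf-8"): str(uid) is ASCII, so each byte is the char's code point
  let uid_bytes : List Nat := (PySem.Int.toChars uid).map Char.toNat
  let bits : List Char :=
    uid_bytes.foldl (fun bits byte =>
      let bits := (PySem.List.pyRange 7 (-1) (-1)).foldl
        (fun bits i => bits ++ [if (byte >>> i.toNat) &&& 1 ≠ 0 then pvZW1 else pvZW0]) bits
      bits ++ [pvZWSEP]) []
  String.ofList bits

-- ===== PORT B =====
-- format(b, "08b") for 0 ≤ b < 256: the 8 binary digits of b, MSB first (exact on that range)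
def pvBin8 (b : Nat) : List Char :=
  (List.range 8).map (fun k => if b / 2 ^ (7 - k) % 2 = 1 then '1' else '0')

-- .replace("0", _ZW_0).replace("1", _ZW_1): per-char translation (exact: every char here is '0' or '1'
-- and the replacements are single zero-width chars, so the two replace passes act char by char)
def pvByteBlock (b : Nat) : List Char :=
  ((pvBin8 b).map (fun c => if c = '0' then pvZW0 else if c = '1' then pvZW1 else c)) ++ [pvZWSEP]

-- _BYTE_TABLE = [ ... for b in range(256) ]
def pvByteTable : List (List Char) := (List.range 256).map pvByteBlock

def encode_fingerprint_py_alt (uid : Int) : String :=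
  String.ofList (((PySem.Int.toChars uid).map (fun c => pvByteTable.getD c.toNat [])).flatten)

-- ===== PRECONDITION & SPEC =====
def Spec_encode_fingerprint_py (uid : Int) (out : String) : Prop := out = encode_fingerprint_py_alt uid
instance (uid : Int) (out : String) : Decidable (Spec_encode_fingerprint_py uid out) := by unfold Spec_encode_fingerprint_py; infer_instance

-- ===== CLAIM (what is proved, stated in full; the proofs are below) =====
def Claim_equal_encode_fingerprint_py : Prop := ∀ (uid : Int), Dom_encode_fingerprint_py uid → Spec_encode_fingerprint_py uid (encode_fingerprint_py uid)

-- ===== LEMMAS AND PROOFS =====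

-- every char Nat.digitChar produces has a small code
lemma pv_digitChar_lt (n : Nat) : (Nat.digitChar n).toNat < 256 := by
  rcases Nat.lt_or_ge n 16 with h | h
  · interval_cases n <;> decide
  · have hstar : Nat.digitChar n = '*' := by
      unfold Nat.digitChar
      rw [if_neg (by omega), if_neg (by omega), if_neg (by omega), if_neg (by omega),
          if_neg (by omega), if_neg (by omega), if_neg (by omega), if_neg (by omega),
          if_neg (by omega), if_neg (by omega), if_neg (by omega), if_neg (by omega),
          if_neg (by omega), if_neg (by omega), if_neg (by omega), if_neg (by omega)]
    rw [hstar]; decide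

lemma pv_toDigitsCore_lt (f : Nat) : ∀ (n : Nat) (acc : List Char),
    (∀ c ∈ acc, c.toNat < 256) → ∀ c ∈ Nat.toDigitsCore 10 f n acc, c.toNat < 256 := by
  induction f with
  | zero => intro n acc hacc c hc; exact hacc c hc
  | succ f ih =>
    intro n acc hacc c hc
    simp only [Nat.toDigitsCore] at hc
    split at hc
    · rw [List.mem_cons] at hc
      rcases hc with h | h
      · subst h; exact pv_digitChar_lt _
      · exact hacc c h
    · refine ih _ _ ?_ c hc
      intro d hd
      rw [List.mem_cons] at hd
      rcases hd with h | h
      · subst h; exact pv_digitChar_lt _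
      · exact hacc d h

lemma pv_toChars_lt (uid : Int) : ∀ c ∈ PySem.Int.toChars uid, c.toNat < 256 := by
  intro c hc
  unfold PySem.Int.toChars at hc
  split at hc
  · rw [List.mem_cons] at hc
    rcases hc with h | h
    · subst h; decide
    · unfold Nat.toDigits at h
      exact pv_toDigitsCore_lt _ _ _ (by simp) c h
  · unfold Nat.toDigits at hc
    exact pv_toDigitsCore_lt _ _ _ (by simp) c hc

-- table lookup = block, for byte values below 256
lemma pv_table_getD (b : Nat) (hb : b < 256) : pvByteTable.getD b [] = pvByteBlock b := by
  simp [pvByteTable, List.getD, hb]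

-- the two per-bit conditionals agree
lemma pv_bit (m : Nat) :
    (if m % 2 = 1 then pvZW1 else pvZW0)
      = if m % 2 = 0 then pvZW0
        else if m % 2 = 1 then pvZW1 else if m % 2 = 1 then '1' else '0' := by
  rcases Nat.mod_two_eq_zero_or_one m with h | h <;> simp [h]

-- A's inner bit loop, followed by the separator append, produces exactly B's block
lemma pv_inner (byte : Nat) (acc : List Char) :
    ((PySem.List.pyRange 7 (-1) (-1)).foldl
      (fun bits i => bits ++ [if (byte >>> i.toNat) &&& 1 ≠ 0 then pvZW1 else pvZW0]) acc)
      ++ [pvZWSEP] = acc ++ pvByteBlock byte := by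
  have hr : PySem.List.pyRange 7 (-1) (-1) = [7, 6, 5, 4, 3, 2, 1, 0] := by decide
  rw [hr]
  simp [List.foldl, pvByteBlock, pvBin8, List.range_succ, Nat.shiftRight_eq_div_pow,
    Nat.and_one_is_mod]
  exact ⟨pv_bit _, pv_bit _, pv_bit _, pv_bit _, pv_bit _, pv_bit _, pv_bit _, pv_bit _⟩

-- A's outer loop = concatenation of B's blocks
lemma pv_outer : ∀ (bytes : List Nat), (∀ b ∈ bytes, b < 256) → ∀ (acc : List Char),
    bytes.foldl (fun bits byte =>
      ((PySem.List.pyRange 7 (-1) (-1)).foldl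
        (fun bits i => bits ++ [if (byte >>> i.toNat) &&& 1 ≠ 0 then pvZW1 else pvZW0]) bits)
        ++ [pvZWSEP]) acc
    = acc ++ (bytes.map (fun b => pvByteTable.getD b [])).flatten := by
  intro bytes
  induction bytes with
  | nil => intro _ acc; simp
  | cons b bs ih =>
    intro hb acc
    simp only [List.foldl_cons, List.map_cons, List.flatten_cons]
    rw [pv_inner, ih (fun x hx => hb x (List.mem_cons_of_mem _ hx)),
      pv_table_getD b (hb b (List.mem_cons_self ..))]
    simp

-- ===== VERDICT (by name: the statement is the Claim_ definition above) =====
theorem encode_fingerprint_py_spec : Claim_equal_encode_fingerprint_py := by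
  intro uid _
  show encode_fingerprint_py uid = encode_fingerprint_py_alt uid
  simp only [encode_fingerprint_py, encode_fingerprint_py_alt]
  rw [pv_outer _ (by intro b hb; obtain ⟨c, hc, rfl⟩ := List.mem_map.mp hb
                     exact pv_toChars_lt uid c hc)]
  simp [List.map_map, Function.comp_def]
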